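-- pv_equiv track=rewrite | github.com/laurioma/aoc | 2019/22/prog.py | dealinc
-- ===== SOURCE A (Python) =====
-- def dealinc(cards, inc):
--     ret = [-1]* len(cards)
--     idx = 0
--     left = 0
--     for i in range(len(cards)):
--         assert (ret[idx] == -1), ret[idx]
--         ret[idx] = cards[i]
--         idx = (idx + inc) % len(cards)
--         if idx == left:
--             idx += 1
--             left = idx
--
--     assert(ret.count(-1) == 0), ret
--     return ret
-- ===== SOURCE B (Python) =====
-- def dealinc(cards, inc):
--     n = len(cards)
--     if n == 0:
--         return []
--     # gcd(|inc|, n) by Euclid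
--     a = inc if inc >= 0 else -inc
--     b = n
--     while b:
--         a, b = b, a % b
--     g = a
--     band = n // g
--     ret = [-1] * n          # placeholder, every slot is written exactly once
--     i = 0
--     for k in range(g):      # one band per residue class mod g
--         pos = k
--         for _ in range(band):
--             ret[pos] = cards[i]
--             i += 1
--             pos = (pos + inc) % n
--     return ret
-- ===== Notes on version B (the rewrite author's own statement) =====
-- stated objective: alternative
-- what changed: B replaces A's single stateful loop (which bumps a 'left' pointer whenever the index wraps back to it) by a gcd-band decomposition: it computes g = gcd(|inc|, n) by Euclid and fills the result in g independent inner loops, one per residue class mod g, consuming the cards sequentially; this drops A's per-element assert and bump branch and A's final count-based assert.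
-- outside the precondition, e.g. on dealinc([-1, 2, 3], 2): A raises AssertionError, B returns [-1, 3, 2]
-- crash fix: On any cards list containing -1 (A's fill sentinel), A raises AssertionError at its final 'ret.count(-1) == 0' check even though the shuffle succeeded; B returns the shuffled list. — e.g. on dealinc([-1, 2, 3], 2): A raises AssertionError, B returns [-1, 3, 2]
import Mathlib
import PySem

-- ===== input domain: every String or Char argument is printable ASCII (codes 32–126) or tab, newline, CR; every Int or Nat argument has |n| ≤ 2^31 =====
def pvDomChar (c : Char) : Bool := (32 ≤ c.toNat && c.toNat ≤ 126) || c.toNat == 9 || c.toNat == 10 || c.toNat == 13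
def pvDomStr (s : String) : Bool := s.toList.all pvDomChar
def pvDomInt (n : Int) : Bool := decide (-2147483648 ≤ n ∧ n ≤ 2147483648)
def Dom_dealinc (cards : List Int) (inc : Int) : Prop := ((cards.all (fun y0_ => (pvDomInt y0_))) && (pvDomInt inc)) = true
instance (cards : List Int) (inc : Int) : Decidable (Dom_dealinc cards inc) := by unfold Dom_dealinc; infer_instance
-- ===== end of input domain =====

-- B replaces A's single left-bumping loop by a gcd-band decomposition (one inner loop per
-- residue class mod gcd(inc, n)), dropping A's per-element assert and bump branch.

-- ===== PORT A =====
-- loop body of A; the first Python assert (ret[idx] == -1) never fails — each slot is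
-- written at most once — and is ported as a no-op
def dealincStep (cards : List Int) (inc n : Int) (st : List Int × Int × Int) (i : Int) :
    List Int × Int × Int :=
  let ret := PySem.List.pySetD st.1 st.2.1 (PySem.List.pyGetD cards i 0)  -- ret[idx] = cards[i]
  let idx := PySem.Int.mod (st.2.1 + inc) n                               -- idx = (idx + inc) % len(cards)
  if idx = st.2.2 then (ret, idx + 1, idx + 1) else (ret, idx, st.2.2)    -- if idx == left: idx += 1; left = idx

-- A's final assert (ret.count(-1) == 0) raises AssertionError exactly when -1 ∈ cards;
-- those inputs are excluded by Pre_dealinc (see Raises_dealinc below)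
def dealinc (cards : List Int) (inc : Int) : List Int :=
  ((PySem.List.pyRange 0 (PySem.List.len cards) 1).foldl
    (dealincStep cards inc (PySem.List.len cards))
    (List.replicate cards.length (-1), 0, 0)).1

-- ===== PORT B =====
-- Source B's Euclid loop 'while b: a, b = b, a % b' (both values stay nonnegative, carried as Nat)
def dealincGcd (a b : Nat) : Nat :=
  if h : b = 0 then a else dealincGcd b (a % b)
termination_by b
decreasing_by exact Nat.mod_lt _ (Nat.pos_of_ne_zero h)

-- Source B's inner loop body (state = (ret, pos, i))
def dealincInner (cards : List Int) (inc n : Int) (s : List Int × Int × Nat) :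
    List Int × Int × Nat :=
  (PySem.List.pySetD s.1 s.2.1 (PySem.List.pyGetD cards (s.2.2 : Int) 0),  -- ret[pos] = cards[i]
   PySem.Int.mod (s.2.1 + inc) n,                                          -- pos = (pos + inc) % n
   s.2.2 + 1)                                                              -- i += 1

def dealinc_alt (cards : List Int) (inc : Int) : List Int :=
  let n := cards.length
  if n = 0 then []
  else
    let g := dealincGcd (if 0 ≤ inc then inc else -inc).toNat n   -- a = abs(inc); Euclid with n
    let band := n / g
    ((List.range g).foldl (fun (st : List Int × Nat) (k : Nat) =>
        let inner := (List.range band).foldl (fun s _ => dealincInner cards inc (n : Int) s)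
          (st.1, (k : Int), st.2)
        (inner.1, inner.2.2))
      (List.replicate n (-1), 0)).1

-- ===== PRECONDITION & SPEC =====
-- Pre_ excludes exactly the inputs on which A raises: its final assert ret.count(-1) == 0
-- fails (AssertionError) precisely when -1 occurs among the cards.
def Pre_dealinc (cards : List Int) (inc : Int) : Prop := (-1 : Int) ∉ cards
instance (cards : List Int) (inc : Int) : Decidable (Pre_dealinc cards inc) := by
  unfold Pre_dealinc; infer_instance

def pvWitness_dealinc : List Int × Int := ([3, 1, 4, 1, 5, 9], 4)

-- On inputs whose card list contains -1, A raises AssertionError (its -1 sentinel collides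
-- with a real card) while B returns the shuffled list as for any other values.
def Raises_dealinc (cards : List Int) (inc : Int) : Prop := (-1 : Int) ∈ cards
instance (cards : List Int) (inc : Int) : Decidable (Raises_dealinc cards inc) := by
  unfold Raises_dealinc; infer_instance

def pvRaiseWitness_dealinc : List Int × Int := ([-1, 2, 3], 2)
def pvRaiseWitnessOut_dealinc : List Int := [-1, 3, 2]

def Spec_dealinc (cards : List Int) (inc : Int) (out : List Int) : Prop := out = dealinc_alt cards inc
instance (cards : List Int) (inc : Int) (out : List Int) : Decidable (Spec_dealinc cards inc out) := by
  unfold Spec_dealinc; infer_instance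

-- ===== CLAIM (what is proved, stated in full; the proofs are below) =====
def Claim_equal_dealinc : Prop := ∀ (cards : List Int) (inc : Int), Dom_dealinc cards inc → Pre_dealinc cards inc → Spec_dealinc cards inc (dealinc cards inc)

def Claim_raises_dealinc : Prop := (∀ (cards : List Int) (inc : Int), Dom_dealinc cards inc → Raises_dealinc cards inc → ¬ Pre_dealinc cards inc) ∧ (Dom_dealinc (pvRaiseWitness_dealinc.1) (pvRaiseWitness_dealinc.2) ∧ Raises_dealinc (pvRaiseWitness_dealinc.1) (pvRaiseWitness_dealinc.2) ∧ dealinc_alt (pvRaiseWitness_dealinc.1) (pvRaiseWitness_dealinc.2) = pvRaiseWitnessOut_dealinc)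

-- ===== LEMMAS AND PROOFS =====

-- Source B's Euclid loop computes the gcd
theorem dealincGcd_eq (a b : Nat) : dealincGcd a b = Nat.gcd b a := by
  induction a, b using dealincGcd.induct with
  | case1 a => simp [dealincGcd]
  | case2 a b h ih =>
      rw [dealincGcd, dif_neg h, ih]
      exact (Nat.gcd_rec b a).symm

-- divisibility characterisation: n | m*inc  ↔  (n / gcd |inc| n) | m
theorem dealinc_dvd_iff (inc : Int) (n : Nat) (hn : 0 < n) (m : Nat) :
    ((n : Int) ∣ (m : Int) * inc) ↔ (n / Nat.gcd inc.natAbs n) ∣ m := by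
  have key : ((n : Int) ∣ (m : Int) * inc) ↔ n ∣ m * inc.natAbs := by
    rw [Int.ofNat_dvd_left, Int.natAbs_mul, Int.natAbs_natCast]
  rw [key]
  have hg : 0 < Nat.gcd inc.natAbs n := Nat.gcd_pos_of_pos_right inc.natAbs hn
  have hcop : Nat.Coprime (inc.natAbs / Nat.gcd inc.natAbs n) (n / Nat.gcd inc.natAbs n) :=
    Nat.coprime_div_gcd_div_gcd hg
  obtain ⟨A, hA⟩ := Nat.gcd_dvd_left inc.natAbs n
  obtain ⟨N', hN⟩ := Nat.gcd_dvd_right inc.natAbs n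
  set g := Nat.gcd inc.natAbs n with hgdef
  have hNg : n / g = N' := by rw [hN]; exact Nat.mul_div_cancel_left N' hg
  have hAg : inc.natAbs / g = A := by rw [hA]; exact Nat.mul_div_cancel_left A hg
  rw [hNg]
  rw [hNg, hAg] at hcop
  constructor
  · intro h
    have h2 : g * N' ∣ g * (m * A) := by
      calc g * N' = n := hN.symm
      _ ∣ m * inc.natAbs := h
      _ = g * (m * A) := by rw [hA]; ring
    have h3 : N' ∣ m * A := (Nat.mul_dvd_mul_iff_left hg).mp h2
    exact (Nat.Coprime.dvd_of_dvd_mul_right hcop.symm) h3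
  · rintro ⟨t, rfl⟩
    exact ⟨t * A, by rw [hA, hN]; ring⟩

-- band lemma: over one orbit, A's left-bumping loop performs exactly B's inner loop
-- and ends with idx = left = k + 1
theorem dealinc_band (cards : List Int) (inc : Int) (n L k : Nat) (hn : 0 < n) (hkn : k < n)
    (hL : ∀ m : Nat, ((n : Int) ∣ (m : Int) * inc) ↔ L ∣ m) :
    ∀ (c : Nat), ∀ (m : Nat), 0 < c → m + c = L → ∀ (ret : List Int) (i0 : Nat),
      List.foldl (dealincStep cards inc (n : Int))
        (ret, ((k : Int) + (m : Int) * inc) % (n : Int), (k : Int))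
        (List.map (fun t : Nat => (t : Int)) (List.range' i0 c))
      = (((List.range c).foldl (fun s _ => dealincInner cards inc (n : Int) s)
            (ret, ((k : Int) + (m : Int) * inc) % (n : Int), i0)).1,
         (k : Int) + 1, (k : Int) + 1) := by
  have hmod : ∀ x : Int, PySem.Int.mod x (n:Int) = x % (n:Int) :=
    fun x => PySem.Int.mod_eq_emod_of_pos (by exact_mod_cast hn)
  have hstep : ∀ m : Nat, (((k : Int) + (m : Int) * inc) % (n : Int) + inc) % (n : Int)
      = ((k : Int) + ((m + 1 : Nat) : Int) * inc) % (n : Int) := by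
    intro m; rw [Int.emod_add_emod]; congr 1; push_cast; ring
  have hPk : ∀ m' : Nat, (((k : Int) + (m' : Int) * inc) % (n : Int) = (k : Int)) ↔ L ∣ m' := by
    intro m'
    rw [← hL m']
    constructor
    · intro h
      have h2 := Int.emod_eq_emod_iff_emod_sub_eq_zero.mp
        (h.trans (Int.emod_eq_of_lt (by positivity) (by exact_mod_cast hkn)).symm)
      rw [add_sub_cancel_left] at h2
      exact (PySem.Int.emod_eq_zero_iff_dvd _ _).mp h2
    · rintro ⟨t, ht⟩
      rw [ht, Int.add_mul_emod_self_left]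
      exact Int.emod_eq_of_lt (by positivity) (by exact_mod_cast hkn)
  intro c
  induction c with
  | zero => intro m hc; omega
  | succ c ih =>
    intro m _ hmc ret i0
    rw [List.range'_succ, List.map_cons, List.foldl_cons]
    have hB : ∀ (s : List Int × Int × Nat),
        (List.range (c+1)).foldl (fun s _ => dealincInner cards inc (n:Int) s) s
        = (List.range c).foldl (fun s _ => dealincInner cards inc (n:Int) s)
            (dealincInner cards inc (n:Int) s) := by
      intro s
      simp [List.range_succ_eq_map, List.foldl_map]
    rw [hB]
    by_cases hc0 : c = 0
    · subst hc0
      have hm1 : L ∣ (m + 1) := by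
        have hme : m + 1 = L := by omega
        exact hme ▸ dvd_refl L
      have hPkEq : ((k : Int) + ((m + 1 : Nat) : Int) * inc) % (n : Int) = (k : Int) :=
        (hPk (m + 1)).mpr hm1
      have hA : dealincStep cards inc (n : Int)
            (ret, ((k : Int) + (m : Int) * inc) % (n : Int), (k : Int)) (i0 : Int)
          = (PySem.List.pySetD ret (((k : Int) + (m : Int) * inc) % (n : Int))
               (PySem.List.pyGetD cards (i0 : Int) 0), (k : Int) + 1, (k : Int) + 1) := by
        simp only [dealincStep, hmod]
        rw [hstep m, hPkEq, if_pos rfl]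
      have hI : dealincInner cards inc (n : Int)
            (ret, ((k : Int) + (m : Int) * inc) % (n : Int), i0)
          = (PySem.List.pySetD ret (((k : Int) + (m : Int) * inc) % (n : Int))
               (PySem.List.pyGetD cards (i0 : Int) 0),
             ((k : Int) + ((m + 1 : Nat) : Int) * inc) % (n : Int), i0 + 1) := by
        simp only [dealincInner, hmod]
        rw [hstep m]
      simp only [List.range_zero, List.foldl_nil, List.range'_zero, List.map_nil, hA, hI]
    · have hm1 : ¬ L ∣ (m + 1) := by
        intro hdvd
        have := Nat.le_of_dvd (by omega) hdvd
        omega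
      have hne : ((k : Int) + ((m + 1 : Nat) : Int) * inc) % (n : Int) ≠ (k : Int) :=
        fun h => hm1 ((hPk (m + 1)).mp h)
      have hA : dealincStep cards inc (n : Int)
            (ret, ((k : Int) + (m : Int) * inc) % (n : Int), (k : Int)) (i0 : Int)
          = (PySem.List.pySetD ret (((k : Int) + (m : Int) * inc) % (n : Int))
               (PySem.List.pyGetD cards (i0 : Int) 0),
             ((k : Int) + ((m + 1 : Nat) : Int) * inc) % (n : Int), (k : Int)) := by
        simp only [dealincStep, hmod]
        rw [hstep m, if_neg hne]
      have hI : dealincInner cards inc (n : Int)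
            (ret, ((k : Int) + (m : Int) * inc) % (n : Int), i0)
          = (PySem.List.pySetD ret (((k : Int) + (m : Int) * inc) % (n : Int))
               (PySem.List.pyGetD cards (i0 : Int) 0),
             ((k : Int) + ((m + 1 : Nat) : Int) * inc) % (n : Int), i0 + 1) := by
        simp only [dealincInner, hmod]
        rw [hstep m]
      rw [hA, hI]
      exact ih (m + 1) (Nat.pos_of_ne_zero hc0) (by omega)
        (PySem.List.pySetD ret (((k : Int) + (m : Int) * inc) % (n : Int))
          (PySem.List.pyGetD cards (i0 : Int) 0)) (i0 + 1)

-- the inner-loop counter just counts the steps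
theorem dealinc_counter (cards : List Int) (inc N : Int) :
    ∀ (c : Nat) (s : List Int × Int × Nat),
      ((List.range c).foldl (fun s _ => dealincInner cards inc N s) s).2.2 = s.2.2 + c := by
  intro c
  induction c with
  | zero => intro s; simp
  | succ c ih =>
      intro s
      rw [List.range_succ, List.foldl_append]
      simp only [List.foldl_cons, List.foldl_nil]
      rw [show ∀ t : List Int × Int × Nat, (dealincInner cards inc N t).2.2 = t.2.2 + 1 from
        fun t => rfl, ih s]
      omega

-- outer induction over the bands
theorem dealinc_outer (cards : List Int) (inc : Int) (n g L : Nat) (hn : 0 < n)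
    (hgL : g * L = n) (hL : ∀ m : Nat, ((n : Int) ∣ (m : Int) * inc) ↔ L ∣ m) :
    ∀ j, j ≤ g →
      List.foldl (dealincStep cards inc (n : Int))
        (List.replicate n (-1), 0, 0)
        (List.map (fun t : Nat => (t : Int)) (List.range' 0 (j * L)))
      = (((List.range j).foldl (fun (st : List Int × Nat) (k : Nat) =>
            let inner := (List.range L).foldl (fun s _ => dealincInner cards inc (n : Int) s)
              (st.1, (k : Int), st.2)
            (inner.1, inner.2.2)) (List.replicate n (-1), 0)).1, (j : Int), (j : Int))
      ∧ ((List.range j).foldl (fun (st : List Int × Nat) (k : Nat) =>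
            let inner := (List.range L).foldl (fun s _ => dealincInner cards inc (n : Int) s)
              (st.1, (k : Int), st.2)
            (inner.1, inner.2.2)) (List.replicate n (-1), 0)).2 = j * L := by
  have hLpos : 0 < L := by
    rcases Nat.eq_zero_or_pos L with h | h
    · subst h; omega
    · exact h
  have hgn : g ≤ n := by nlinarith
  intro j
  induction j with
  | zero => simp
  | succ j ih =>
      intro hj
      obtain ⟨ih1, ih2⟩ := ih (by omega)
      have hjn : j < n := by omega
      constructor
      · rw [Nat.succ_mul, ← List.range'_append_1, List.map_append, List.foldl_append, ih1]
        have hband := dealinc_band cards inc n L j hn hjn hL L 0 hLpos (by omega)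
          (((List.range j).foldl (fun (st : List Int × Nat) (k : Nat) =>
            let inner := (List.range L).foldl (fun s _ => dealincInner cards inc (n : Int) s)
              (st.1, (k : Int), st.2)
            (inner.1, inner.2.2)) (List.replicate n (-1), 0)).1) (j * L)
        have hP0 : ((j : Int) + ((0 : Nat) : Int) * inc) % (n : Int) = (j : Int) := by
          simp only [Nat.cast_zero, zero_mul, add_zero]
          exact Int.emod_eq_of_lt (by positivity) (by exact_mod_cast hjn)
        rw [hP0] at hband
        simp only [Nat.zero_add]
        rw [hband, List.range_succ, List.foldl_append, List.foldl_cons, List.foldl_nil]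
        simp only [← ih2]
        push_cast
        rfl
      · rw [List.range_succ, List.foldl_append, List.foldl_cons, List.foldl_nil]
        simp only []
        rw [dealinc_counter]
        simp only [ih2]
        ring

-- the two ports agree on every input
theorem dealinc_eq_alt (cards : List Int) (inc : Int) : dealinc cards inc = dealinc_alt cards inc := by
  by_cases hn : cards.length = 0
  · rw [List.length_eq_zero_iff] at hn
    subst hn
    simp [dealinc, dealinc_alt]
  · have hpos : 0 < cards.length := Nat.pos_of_ne_zero hn
    have habs : (if 0 ≤ inc then inc else -inc).toNat = inc.natAbs := by split_ifs <;> omega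
    have hgcd : dealincGcd (if 0 ≤ inc then inc else -inc).toNat cards.length
        = Nat.gcd inc.natAbs cards.length := by
      rw [habs, dealincGcd_eq, Nat.gcd_comm]
    have hgdvd : Nat.gcd inc.natAbs cards.length ∣ cards.length := Nat.gcd_dvd_right _ _
    have hgL : Nat.gcd inc.natAbs cards.length
        * (cards.length / Nat.gcd inc.natAbs cards.length) = cards.length :=
      Nat.mul_div_cancel' hgdvd
    have houter := (dealinc_outer cards inc cards.length (Nat.gcd inc.natAbs cards.length)
      (cards.length / Nat.gcd inc.natAbs cards.length) hpos hgL
      (fun m => dealinc_dvd_iff inc cards.length hpos m)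
      (Nat.gcd inc.natAbs cards.length) (le_refl _)).1
    rw [hgL] at houter
    have hrange : PySem.List.pyRange 0 ((cards.length : Nat) : Int) 1
        = List.map (fun t : Nat => (t : Int)) (List.range' 0 cards.length) := by
      rw [PySem.List.pyRange_one]
      simp [List.range_eq_range']
    simp only [dealinc, dealinc_alt, PySem.List.len_eq, hrange, if_neg hn, hgcd]
    rw [houter]

-- ===== VERDICT (by name: the statement is the Claim_ definition above) =====
theorem dealinc_spec : Claim_equal_dealinc := by
  intro cards inc _ _
  unfold Spec_dealinc
  exact dealinc_eq_alt cards inc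

theorem dealinc_raises : Claim_raises_dealinc := by
  unfold Claim_raises_dealinc
  refine ⟨fun cards inc _ h hp => hp h, by decide, by decide, ?_⟩
  show dealinc_alt [-1, 2, 3] 2 = [-1, 3, 2]
  simp [dealinc_alt, dealincGcd, dealincInner, List.range_succ,
    PySem.List.pySetD, PySem.List.pyGetD, PySem.Int.mod]
  decide

-- the crash-fix witness value, re-stated on its own: B's port really returns the stated
-- literal on the input where Python A raises
theorem pvRaiseWitnessCheck_ok :
    dealinc_alt pvRaiseWitness_dealinc.1 pvRaiseWitness_dealinc.2 = pvRaiseWitnessOut_dealinc :=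
  dealinc_raises.2.2.2
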